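-- pv_equiv track=rewrite | github.com/gowthambalachandhiran/CrackingTheCodingInterview | Moderate/pondSizes.py | pondSizes
-- ===== SOURCE A (Python) =====
-- def pondSizes(matrix):
--     def dfs(r, c):
--         if r < 0 or r >= len(matrix) or c < 0 or c >= len(matrix[0]) or matrix[r][c] != 0:
--             return 0
--
--         size = 1
--         matrix[r][c] = -1  # Mark the cell as visited
--
--         # Explore all neighboring cells (including diagonals)
--         for dr in [-1, 0, 1]:
--             for dc in [-1, 0, 1]:
--                 size += dfs(r + dr, c + dc)
--
--         return size
--
--     sizes = []
--     for r in range(len(matrix)):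
--         for c in range(len(matrix[0])):
--             if matrix[r][c] == 0:
--                 sizes.append(dfs(r, c))
--
--     return sizes
-- ===== SOURCE B (Python) =====
-- def pondSizes(matrix):
--     sizes = []
--     for r in range(len(matrix)):
--         for c in range(len(matrix[0])):
--             if matrix[r][c] == 0:
--                 size = 0
--                 stack = [(r, c)]
--                 while stack:
--                     i, j = stack.pop()
--                     if i < 0 or i >= len(matrix) or j < 0 or j >= len(matrix[0]) or matrix[i][j] != 0:
--                         continue
--                     matrix[i][j] = -1
--                     size += 1
--                     for di in (1, 0, -1):
--                         for dj in (1, 0, -1):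
--                             stack.append((i + di, j + dj))
--                 sizes.append(size)
--     return sizes
-- ===== Notes on version B (the rewrite author's own statement) =====
-- stated objective: alternative
-- what changed: The recursive 9-way DFS with call-stack state is replaced by an iterative flood fill with an explicit stack of cells, checked-and-marked at pop time; the outer row-major scan is kept.
import Mathlib
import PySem

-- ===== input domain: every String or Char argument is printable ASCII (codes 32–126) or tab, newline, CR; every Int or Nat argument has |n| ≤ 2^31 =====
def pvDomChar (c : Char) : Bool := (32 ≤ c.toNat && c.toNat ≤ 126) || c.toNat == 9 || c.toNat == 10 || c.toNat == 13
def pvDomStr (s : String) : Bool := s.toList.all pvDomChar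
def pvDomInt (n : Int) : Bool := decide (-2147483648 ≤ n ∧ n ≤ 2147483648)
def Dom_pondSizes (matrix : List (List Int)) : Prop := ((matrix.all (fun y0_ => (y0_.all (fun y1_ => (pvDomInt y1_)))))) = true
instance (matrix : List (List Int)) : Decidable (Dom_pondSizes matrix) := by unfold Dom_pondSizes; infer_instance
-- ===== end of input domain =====

-- B replaces A's recursive DFS by an explicit-stack iterative flood fill (mark at pop);
-- both mutate `matrix` identically in Python; the theorems are about the returned size list.

-- ===== PORT A =====
-- shared Python primitives: matrix[r][c] read, matrix[r][c] = v, and the bounds/value guard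
-- (the identical guard line occurs in both Python sources)
def pvGetCell (m : List (List Int)) (r c : Int) : Int := (m.getD r.toNat []).getD c.toNat 0

def pvSetCell (m : List (List Int)) (r c : Int) (v : Int) : List (List Int) :=
  m.set r.toNat ((m.getD r.toNat []).set c.toNat v)

def pvStop (m : List (List Int)) (r c : Int) : Bool :=
  r < 0 || (m.length : Int) ≤ r || c < 0 || ((m.headD []).length : Int) ≤ c || pvGetCell m r c != 0

-- the 9 (dr, dc) pairs in A's nested-loop order (= B's pop order)
def pvOffsets : List (Int × Int) :=
  [(-1,-1),(-1,0),(-1,1),(0,-1),(0,0),(0,1),(1,-1),(1,0),(1,1)]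

-- A's recursive dfs; fuel only makes the recursion total (flatten.length+1 always suffices:
-- each non-trivial call erases one zero cell)
mutual
def pvDfsA (f : Nat) (m : List (List Int)) (r c : Int) : List (List Int) × Int :=
  match f with
  | 0 => (m, 0)
  | f + 1 =>
    if pvStop m r c then (m, 0)
    else
      let res := pvDfsCells f (pvSetCell m r c (-1)) (pvOffsets.map (fun d => (r + d.1, c + d.2)))
      (res.1, 1 + res.2)
termination_by (f, 0)

def pvDfsCells (f : Nat) (m : List (List Int)) (cells : List (Int × Int)) : List (List Int) × Int :=
  match cells with
  | [] => (m, 0)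
  | (i, j) :: rest =>
    let r1 := pvDfsA f m i j
    let r2 := pvDfsCells f r1.1 rest
    (r2.1, r1.2 + r2.2)
termination_by (f, cells.length + 1)
end

def pvInnerA (F : Nat) (r : Nat) (st : List (List Int) × List Int) (c : Nat) : List (List Int) × List Int :=
  if pvGetCell st.1 (r : Int) (c : Int) = 0 then
    let d := pvDfsA F st.1 (r : Int) (c : Int)
    (d.1, st.2 ++ [d.2])
  else st

def pondSizes (matrix : List (List Int)) : List Int :=
  let F := matrix.flatten.length + 1
  ((List.range matrix.length).foldl
      (fun st r => (List.range (matrix.headD []).length).foldl (pvInnerA F r) st)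
      (matrix, [])).2

-- ===== PORT B =====
-- B's while loop; Lean list head = top of Python's end-stack (append = cons), so Python's
-- reversed pushes appear here as `pvOffsets.map … ++ rest`; fuel only makes the loop total
def pvLoopB (g : Nat) (m : List (List Int)) (st : List (Int × Int)) (size : Int) :
    List (List Int) × Int :=
  match g, st with
  | 0, _ => (m, size)
  | _ + 1, [] => (m, size)
  | g + 1, (i, j) :: rest =>
    if pvStop m i j then pvLoopB g m rest size
    else pvLoopB g (pvSetCell m i j (-1))
        (pvOffsets.map (fun d => (i + d.1, j + d.2)) ++ rest) (size + 1)

def pvInnerB (G : Nat) (r : Nat) (st : List (List Int) × List Int) (c : Nat) : List (List Int) × List Int :=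
  if pvGetCell st.1 (r : Int) (c : Int) = 0 then
    let d := pvLoopB G st.1 [((r : Int), (c : Int))] 0
    (d.1, st.2 ++ [d.2])
  else st

def pondSizes_alt (matrix : List (List Int)) : List Int :=
  let G := 9 * matrix.flatten.length + 2
  ((List.range matrix.length).foldl
      (fun st r => (List.range (matrix.headD []).length).foldl (pvInnerB G r) st)
      (matrix, [])).2

-- ===== PRECONDITION & SPEC =====
-- Pre_ excludes exactly the inputs where Python A raises IndexError: a row shorter than row 0
-- (every cell matrix[r][c], c < len(matrix[0]), is read by the outer loop).
def Pre_pondSizes (matrix : List (List Int)) : Prop :=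
  ∀ row ∈ matrix, (matrix.headD []).length ≤ row.length

instance (matrix : List (List Int)) : Decidable (Pre_pondSizes matrix) := by
  unfold Pre_pondSizes; infer_instance

def pvWitness_pondSizes : List (List Int) := [[0, 1], [1, 0]]

def Spec_pondSizes (matrix : List (List Int)) (out : List Int) : Prop := out = pondSizes_alt matrix
instance (matrix : List (List Int)) (out : List Int) : Decidable (Spec_pondSizes matrix out) := by unfold Spec_pondSizes; infer_instance

-- ===== CLAIM (what is proved, stated in full; the proofs are below) =====
def Claim_equal_pondSizes : Prop := ∀ (matrix : List (List Int)), Dom_pondSizes matrix → Pre_pondSizes matrix → Spec_pondSizes matrix (pondSizes matrix)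

-- ===== LEMMAS AND PROOFS =====

def pvZ (m : List (List Int)) : Nat := m.flatten.countP (fun x => x == 0)
def pvPP (m : List (List Int)) : Prop :=
  ∀ k, k < m.length → (m.headD []).length ≤ (m.getD k []).length

theorem pvCntP_set_le (l : List Int) (n : Nat) :
    ((l.set n (-1)).countP (fun x => x == 0)) ≤ l.countP (fun x => x == 0) := by
  induction l generalizing n with
  | nil => simp
  | cons a t ih =>
    cases n with
    | zero => simp [List.countP_cons]
    | succ n => simp [List.countP_cons]; exact ih n

theorem pvCntP_set_eq (l : List Int) (n : Nat) (h : n < l.length) (h0 : l.getD n 0 = 0) :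
    (l.set n (-1)).countP (fun x => x == 0) + 1 = l.countP (fun x => x == 0) := by
  induction l generalizing n with
  | nil => simp at h
  | cons a t ih =>
    cases n with
    | zero => simp_all
    | succ n =>
      simp [List.getD_eq_getElem?_getD] at h h0
      have := ih n h (by simp [List.getD_eq_getElem?_getD, h0])
      simp [List.countP_cons]; split <;> omega

theorem pvZ_cons (row : List Int) (t : List (List Int)) :
    pvZ (row :: t) = row.countP (fun x => x == 0) + pvZ t := by
  simp [pvZ, List.countP_append]

theorem pvZ_set_le (m : List (List Int)) (r c : Nat) :
    pvZ (m.set r ((m.getD r []).set c (-1))) ≤ pvZ m := by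
  induction m generalizing r with
  | nil => simp
  | cons a t ih =>
    cases r with
    | zero => simp [pvZ_cons]; have := pvCntP_set_le a c; omega
    | succ r =>
      have := ih r
      simp only [List.getD_eq_getElem?_getD] at this ⊢
      simp only [List.getElem?_cons_succ, List.set_cons_succ, pvZ_cons]
      omega

theorem pvZ_set_eq (m : List (List Int)) (r c : Nat) (hr : r < m.length)
    (hc : c < (m.getD r []).length) (h0 : (m.getD r []).getD c 0 = 0) :
    pvZ (m.set r ((m.getD r []).set c (-1))) + 1 = pvZ m := by
  induction m generalizing r with
  | nil => simp at hr
  | cons a t ih =>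
    cases r with
    | zero =>
      simp only [List.getD_cons_zero] at hc h0 ⊢
      simp only [List.set_cons_zero, pvZ_cons]
      have := pvCntP_set_eq a c hc h0; omega
    | succ r =>
      simp only [List.length_cons] at hr
      simp only [List.getD_cons_succ] at hc h0 ⊢
      have := ih r (by omega) hc h0
      simp only [List.set_cons_succ, pvZ_cons]
      omega

theorem pvFlatLen_set (m : List (List Int)) (r c : Nat) (v : Int) :
    (m.set r ((m.getD r []).set c v)).flatten.length = m.flatten.length := by
  induction m generalizing r with
  | nil => simp
  | cons a t ih =>
    cases r with
    | zero => simp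
    | succ r =>
      have := ih r
      simp only [List.getD_cons_succ, List.set_cons_succ, List.flatten_cons, List.length_append]
      omega

theorem pvGetD_len_set (m : List (List Int)) (r c : Nat) (v : Int) (k : Nat) :
    ((m.set r ((m.getD r []).set c v)).getD k []).length = (m.getD k []).length := by
  induction m generalizing r k with
  | nil => simp
  | cons a t ih =>
    cases r with
    | zero => cases k <;> simp
    | succ r =>
      cases k with
      | zero => simp
      | succ k =>
        simp only [List.getD_cons_succ, List.set_cons_succ]
        exact ih r k

theorem pvHeadD_len_set (m : List (List Int)) (r c : Nat) (v : Int) :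
    ((m.set r ((m.getD r []).set c v)).headD []).length = (m.headD []).length := by
  cases m with
  | nil => simp
  | cons a t => cases r <;> simp

theorem pvPP_set (m : List (List Int)) (r c : Nat) (v : Int) (h : pvPP m) :
    pvPP (m.set r ((m.getD r []).set c v)) := by
  intro k hk
  rw [pvGetD_len_set, pvHeadD_len_set]
  exact h k (by simpa using hk)

-- consequences of the guard evaluating to false
theorem pvStop_false (m : List (List Int)) (r c : Int) (h : pvStop m r c = false) :
    0 ≤ r ∧ r.toNat < m.length ∧ 0 ≤ c ∧ c.toNat < (m.headD []).length ∧ pvGetCell m r c = 0 := by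
  simp only [pvStop, Bool.or_eq_false_iff, decide_eq_false_iff_not, not_lt, not_le,
    bne_eq_false_iff_eq] at h
  obtain ⟨⟨⟨⟨h1, h2⟩, h3⟩, h4⟩, h5⟩ := h
  refine ⟨h1, by omega, h3, by omega, h5⟩

theorem pvPP_setCell (m : List (List Int)) (r c : Int) (v : Int) (h : pvPP m) :
    pvPP (pvSetCell m r c v) := pvPP_set m r.toNat c.toNat v h

theorem pvZ_setCell_le (m : List (List Int)) (r c : Int) :
    pvZ (pvSetCell m r c (-1)) ≤ pvZ m := pvZ_set_le m r.toNat c.toNat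

theorem pvFlatLen_setCell (m : List (List Int)) (r c : Int) (v : Int) :
    (pvSetCell m r c v).flatten.length = m.flatten.length := pvFlatLen_set m r.toNat c.toNat v

theorem pvZ_setCell_eq (m : List (List Int)) (r c : Int) (hp : pvPP m)
    (h : pvStop m r c = false) : pvZ (pvSetCell m r c (-1)) + 1 = pvZ m := by
  obtain ⟨h0, hr, h2, hc, hv⟩ := pvStop_false m r c h
  exact pvZ_set_eq m r.toNat c.toNat hr (lt_of_lt_of_le hc (hp r.toNat hr)) hv

theorem pvDfsCells_inv_of (f : Nat)
    (hA : ∀ m r c, pvPP m → pvPP (pvDfsA f m r c).1 ∧ pvZ (pvDfsA f m r c).1 ≤ pvZ m ∧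
      (pvDfsA f m r c).1.flatten.length = m.flatten.length) :
    ∀ cells m, pvPP m → pvPP (pvDfsCells f m cells).1 ∧ pvZ (pvDfsCells f m cells).1 ≤ pvZ m ∧
      (pvDfsCells f m cells).1.flatten.length = m.flatten.length := by
  intro cells
  induction cells with
  | nil => intro m h; simpa [pvDfsCells] using h
  | cons p rest ih =>
    intro m h
    obtain ⟨i, j⟩ := p
    obtain ⟨hp1, hz1, hl1⟩ := hA m i j h
    obtain ⟨hp2, hz2, hl2⟩ := ih (pvDfsA f m i j).1 hp1
    simp only [pvDfsCells]
    exact ⟨hp2, by omega, by omega⟩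

theorem pvDfsA_inv (f : Nat) : ∀ m r c, pvPP m →
    pvPP (pvDfsA f m r c).1 ∧ pvZ (pvDfsA f m r c).1 ≤ pvZ m ∧
      (pvDfsA f m r c).1.flatten.length = m.flatten.length := by
  induction f with
  | zero => intro m r c h; simpa [pvDfsA] using h
  | succ f ih =>
    intro m r c h
    by_cases hs : pvStop m r c
    · simpa [pvDfsA, hs] using h
    · simp only [pvDfsA, hs, if_neg, Bool.false_eq_true, not_false_eq_true]
      obtain ⟨hp1, hz1, hl1⟩ := pvDfsCells_inv_of f ih
        (pvOffsets.map (fun d => (r + d.1, c + d.2))) (pvSetCell m r c (-1))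
        (pvPP_setCell m r c (-1) h)
      have hz0 := pvZ_setCell_le m r c
      have hl0 := pvFlatLen_setCell m r c (-1)
      exact ⟨hp1, by omega, by omega⟩

theorem pvDfsCells_inv (f : Nat) : ∀ cells m, pvPP m →
    pvPP (pvDfsCells f m cells).1 ∧ pvZ (pvDfsCells f m cells).1 ≤ pvZ m ∧
      (pvDfsCells f m cells).1.flatten.length = m.flatten.length :=
  pvDfsCells_inv_of f (pvDfsA_inv f)

theorem pvDfsCells_mono_of (f g : Nat)
    (hA : ∀ m r c, pvPP m → pvZ m < f → pvZ m < g → pvDfsA f m r c = pvDfsA g m r c) :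
    ∀ cells m, pvPP m → pvZ m < f → pvZ m < g →
      pvDfsCells f m cells = pvDfsCells g m cells := by
  intro cells
  induction cells with
  | nil => intro m _ _ _; simp [pvDfsCells]
  | cons p rest ih =>
    intro m hp hf hg
    obtain ⟨i, j⟩ := p
    obtain ⟨hp1, hz1, _⟩ := pvDfsA_inv f m i j hp
    simp only [pvDfsCells]
    rw [← hA m i j hp hf hg]
    rw [ih (pvDfsA f m i j).1 hp1 (by omega) (by omega)]

theorem pvDfsA_mono (f : Nat) : ∀ g m r c, pvPP m → pvZ m < f → pvZ m < g →
    pvDfsA f m r c = pvDfsA g m r c := by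
  induction f with
  | zero => intro g m r c _ hf _; omega
  | succ f ih =>
    intro g m r c hp hf hg
    cases g with
    | zero => omega
    | succ g =>
      by_cases hs : pvStop m r c
      · simp [pvDfsA, hs]
      · simp only [pvDfsA, hs, Bool.false_eq_true, if_false]
        have hz := pvZ_setCell_eq m r c hp (by simpa using hs)
        rw [pvDfsCells_mono_of f g (fun m => ih g m) _ (pvSetCell m r c (-1))
          (pvPP_setCell m r c (-1) hp) (by omega) (by omega)]

theorem pvDfsCells_mono (f g : Nat) (cells : List (Int × Int)) (m : List (List Int))
    (hp : pvPP m) (hf : pvZ m < f) (hg : pvZ m < g) :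
    pvDfsCells f m cells = pvDfsCells g m cells :=
  pvDfsCells_mono_of f g (fun m r c hp' hf' hg' => pvDfsA_mono f g m r c hp' hf' hg')
    cells m hp hf hg

theorem pvOffsets_len (i j : Int) : (pvOffsets.map (fun d => (i + d.1, j + d.2))).length = 9 := by
  simp [pvOffsets]

theorem pvLoopB_mono (f : Nat) : ∀ g m st size, pvPP m →
    st.length + 9 * pvZ m < f → st.length + 9 * pvZ m < g →
    pvLoopB f m st size = pvLoopB g m st size := by
  induction f with
  | zero => intro g m st size _ hf _; omega
  | succ f ih =>
    intro g m st size hp hf hg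
    cases g with
    | zero => omega
    | succ g =>
      match st with
      | [] => simp [pvLoopB]
      | (i, j) :: rest =>
        simp only [pvLoopB]
        by_cases hs : pvStop m i j
        · simp only [hs, if_true]
          exact ih g m rest size hp (by simp at hf ⊢; omega) (by simp at hg ⊢; omega)
        · simp only [hs, Bool.false_eq_true, if_false]
          have hz := pvZ_setCell_eq m i j hp (by simpa using hs)
          apply ih g _ _ _ (pvPP_setCell m i j (-1) hp)
          · simp only [List.length_append, pvOffsets_len]; simp at hf; omega
          · simp only [List.length_append, pvOffsets_len]; simp at hg; omega

theorem pvDfsCells_append (f : Nat) (xs ys : List (Int × Int)) : ∀ m,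
    pvDfsCells f m (xs ++ ys) =
      ((pvDfsCells f (pvDfsCells f m xs).1 ys).1,
       (pvDfsCells f m xs).2 + (pvDfsCells f (pvDfsCells f m xs).1 ys).2) := by
  induction xs with
  | nil => intro m; simp [pvDfsCells]
  | cons p rest ih =>
    intro m
    obtain ⟨i, j⟩ := p
    simp only [List.cons_append, pvDfsCells, ih]
    rw [Prod.mk.injEq]
    exact ⟨rfl, by ring⟩

-- the bisimulation: running B's stack loop on `cells ++ st` first performs A's dfs on `cells`
theorem pvMain (n : Nat) : ∀ (f g : Nat) (m : List (List Int)) (cells st : List (Int × Int))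
    (size : Int), pvPP m → pvZ m < f → cells.length + st.length + 9 * pvZ m < g →
    10 * pvZ m + cells.length ≤ n →
    pvLoopB g m (cells ++ st) size =
      pvLoopB g (pvDfsCells f m cells).1 st (size + (pvDfsCells f m cells).2) := by
  induction n using Nat.strong_induction_on with
  | _ n ih =>
  intro f g m cells st size hp hf hg hn
  match cells with
  | [] => simp [pvDfsCells]
  | (i, j) :: rest =>
    match f, g with
    | f + 1, g + 1 =>
      simp only [List.cons_append, pvLoopB, pvDfsCells, pvDfsA]
      by_cases hs : pvStop m i j
      · simp only [hs, if_true]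
        have step := ih (10 * pvZ m + rest.length) (by simp at hn; omega)
          (f + 1) g m rest st size hp hf (by simp at hg; omega) (by omega)
        rw [step]
        have ⟨hp2, hz2, _⟩ := pvDfsCells_inv (f + 1) rest m hp
        rw [pvLoopB_mono g (g + 1) _ st _ hp2 (by simp at hg; omega) (by simp at hg; omega)]
        simp
      · simp only [hs, Bool.false_eq_true, if_false]
        have hz := pvZ_setCell_eq m i j hp (by simpa using hs)
        have hp1 := pvPP_setCell m i j (-1) hp
        set m1 := pvSetCell m i j (-1) with hm1
        set nbrs := pvOffsets.map (fun d => (i + d.1, j + d.2)) with hnb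
        have hnl : nbrs.length = 9 := pvOffsets_len i j
        rw [← List.append_assoc]
        have step := ih (10 * pvZ m1 + (nbrs ++ rest).length)
          (by simp only [List.length_append, hnl]; simp at hn; omega)
          f g m1 (nbrs ++ rest) st (size + 1) hp1 (by omega)
          (by simp only [List.length_append, hnl]; simp at hg; omega)
          (by simp only [List.length_append, hnl]; omega)
        rw [step]
        rw [pvDfsCells_append f nbrs rest m1]
        have ⟨hpM1, hzM1, _⟩ := pvDfsCells_inv f nbrs m1 hp1
        rw [pvDfsCells_mono (f + 1) f rest (pvDfsCells f m1 nbrs).1 hpM1 (by omega) (by omega)]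
        have ⟨hpM2, hzM2, _⟩ := pvDfsCells_inv f rest (pvDfsCells f m1 nbrs).1 hpM1
        rw [pvLoopB_mono g (g + 1) _ st _ hpM2 (by simp at hg; omega) (by simp at hg; omega)]
        congr 1
        ring
    | 0, _ => omega
    | _ + 1, 0 => omega

theorem pvSingle (f g : Nat) (m : List (List Int)) (i j : Int) (hp : pvPP m)
    (hf : pvZ m < f) (hg : 1 + 9 * pvZ m < g) :
    pvLoopB g m [(i, j)] 0 = pvDfsA f m i j := by
  have h := pvMain (10 * pvZ m + 1) f g m [(i, j)] [] 0 hp hf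
    (by simp; omega) (by simp; try omega)
  simp only [List.append_nil] at h
  rw [h]
  match g, hg with
  | g + 1, _ => simp [pvLoopB, pvDfsCells]

theorem pvInner_eq : ∀ (cs : List Nat) (r F G : Nat) (m : List (List Int)) (sz : List Int),
    pvPP m → m.flatten.length < F → 1 + 9 * m.flatten.length < G →
    List.foldl (pvInnerB G r) (m, sz) cs = List.foldl (pvInnerA F r) (m, sz) cs
    ∧ pvPP (List.foldl (pvInnerA F r) (m, sz) cs).1
    ∧ (List.foldl (pvInnerA F r) (m, sz) cs).1.flatten.length = m.flatten.length := by
  intro cs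
  induction cs with
  | nil => intro r F G m sz hp _ _; exact ⟨rfl, hp, rfl⟩
  | cons c cs ih =>
    intro r F G m sz hp hF hG
    simp only [List.foldl_cons]
    by_cases h0 : pvGetCell m (r : Int) (c : Int) = 0
    · have hzlen : pvZ m ≤ m.flatten.length := List.countP_le_length
      have hsingle := pvSingle F G m (r : Int) (c : Int) hp (by omega) (by omega)
      have hIA : pvInnerA F r (m, sz) c =
          ((pvDfsA F m (r : Int) (c : Int)).1, sz ++ [(pvDfsA F m (r : Int) (c : Int)).2]) := by
        simp [pvInnerA, h0]
      have hIB : pvInnerB G r (m, sz) c =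
          ((pvDfsA F m (r : Int) (c : Int)).1, sz ++ [(pvDfsA F m (r : Int) (c : Int)).2]) := by
        simp [pvInnerB, h0, hsingle]
      obtain ⟨hpA, _, hlA⟩ := pvDfsA_inv F m (r : Int) (c : Int) hp
      rw [hIA, hIB]
      obtain ⟨e1, e2, e3⟩ := ih r F G (pvDfsA F m (r : Int) (c : Int)).1
        (sz ++ [(pvDfsA F m (r : Int) (c : Int)).2]) hpA (by omega) (by omega)
      exact ⟨e1, e2, by omega⟩
    · have hIA : pvInnerA F r (m, sz) c = (m, sz) := by simp [pvInnerA, h0]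
      have hIB : pvInnerB G r (m, sz) c = (m, sz) := by simp [pvInnerB, h0]
      rw [hIA, hIB]
      exact ih r F G m sz hp hF hG

theorem pvOuter_eq : ∀ (rs : List Nat) (cols F G : Nat) (m : List (List Int)) (sz : List Int),
    pvPP m → m.flatten.length < F → 1 + 9 * m.flatten.length < G →
    List.foldl (fun st r => (List.range cols).foldl (pvInnerB G r) st) (m, sz) rs
      = List.foldl (fun st r => (List.range cols).foldl (pvInnerA F r) st) (m, sz) rs := by
  intro rs
  induction rs with
  | nil => intro _ _ _ _ _ _ _ _; rfl
  | cons r rs ih =>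
    intro cols F G m sz hp hF hG
    simp only [List.foldl_cons]
    obtain ⟨e1, e2, e3⟩ := pvInner_eq (List.range cols) r F G m sz hp hF hG
    rw [e1]
    rcases hst : List.foldl (pvInnerA F r) (m, sz) (List.range cols) with ⟨m', sz'⟩
    rw [hst] at e2 e3
    simp only at e2 e3
    exact ih cols F G m' sz' e2 (by omega) (by omega)

theorem pvFinal (matrix : List (List Int)) (hpre : Pre_pondSizes matrix) :
    pondSizes matrix = pondSizes_alt matrix := by
  have hp : pvPP matrix := by
    intro k hk
    exact hpre (matrix.getD k []) (by rw [List.getD_eq_getElem _ _ hk]; exact List.getElem_mem hk)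
  have h := pvOuter_eq (List.range matrix.length) ((matrix.headD []).length)
    (matrix.flatten.length + 1) (9 * matrix.flatten.length + 2) matrix [] hp (by omega) (by omega)
  simp only [pondSizes, pondSizes_alt]
  rw [h]

-- ===== VERDICT (by name: the statement is the Claim_ definition above) =====
theorem pondSizes_spec : Claim_equal_pondSizes := by
  intro matrix _ hpre
  unfold Spec_pondSizes
  exact pvFinal matrix hpre
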